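-- pv_equiv track=rewrite | github.com/RascalTwo/DailyProblem | problems/DailyCoding/331/solve.py | solve
-- ===== SOURCE A (Python) =====
-- import itertools
-- from typing import List, Sequence, Tuple
--
-- def solve(initial: str) -> List[int]:
-- 	best: Tuple[int, Sequence[bool]] = (len(initial), [])
-- 	for flips in itertools.product([True, False], repeat=len(initial)):
-- 		attempt = ''
-- 		for i, char in enumerate(initial):
-- 			if char == 'x':
-- 				attempt += {True: 'y', False: 'x'}[flips[i]]
-- 			else:
-- 				attempt += {True: 'x', False: 'y'}[flips[i]]
--
-- 		ys = False
-- 		for char in attempt: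
-- 			if char == 'x' and ys:
-- 				break
-- 			if char == 'y':
-- 				ys = True
-- 		else:
-- 			count = sum(flips)
--
-- 			if best[0] is None:
-- 				best = (count, flips)
-- 				continue
--
-- 			if count < best[0]:
-- 				best = (count, flips)
--
-- 	return [i for i, flipped in enumerate(best[1]) if flipped]
-- ===== SOURCE B (Python) =====
-- def solve(initial):
--     n = len(initial)
--     # cost(k) = flips needed to make chars before boundary k all 'x' and from k on all 'y'
--     costs = []
--     cost = sum(1 for c in initial if c == 'x')  # boundary 0: flip every 'x' to 'y'
--     for k in range(n + 1):
--         costs.append(cost)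
--         if k < n:
--             cost += 1 if initial[k] != 'x' else -1
--     m = min(costs)
--     cands = [k for k, c in enumerate(costs) if c == m]
--     # A's tie-break (first minimal flips tuple in itertools.product order, True before
--     # False): the first minimal boundary k with initial[k] == 'x', else the last one.
--     best_k = next((k for k in cands if k < n and initial[k] == 'x'), cands[-1])
--     return [i for i, c in enumerate(initial) if (c != 'x') == (i < best_k)]
-- ===== Notes on version B (the rewrite author's own statement) =====
-- stated objective: faster
-- what changed: A enumerates all 2^n flip vectors, builds and validates each candidate string and keeps the first one of minimal flip count; B computes for each of the n+1 boundary positions the mismatch count via a running prefix sum, takes the minimum, and reproduces A's product-order tie-break (first minimal boundary whose char is 'x', else the last minimal boundary).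
import Mathlib
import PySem

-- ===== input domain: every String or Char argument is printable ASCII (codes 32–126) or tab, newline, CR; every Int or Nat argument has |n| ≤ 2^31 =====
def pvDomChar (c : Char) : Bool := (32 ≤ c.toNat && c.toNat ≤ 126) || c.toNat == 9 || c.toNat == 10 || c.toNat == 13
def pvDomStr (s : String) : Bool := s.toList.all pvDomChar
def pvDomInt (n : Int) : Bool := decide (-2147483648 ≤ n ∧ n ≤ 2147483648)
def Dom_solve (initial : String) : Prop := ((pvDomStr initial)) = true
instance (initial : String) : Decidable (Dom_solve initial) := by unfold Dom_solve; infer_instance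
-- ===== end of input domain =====

-- B replaces A's enumeration of all 2^n flip vectors by a single scan over the n+1
-- boundary positions with running mismatch counts (objective: faster, asymptotic).

-- ===== PORT A =====

-- itertools.product([True, False], repeat=n): exact enumeration order
-- (first tuple all True, rightmost coordinate varies fastest)
def pyProduct : Nat → List (List Bool)
  | 0 => [[]]
  | n+1 => (pyProduct n).map (List.cons true) ++ (pyProduct n).map (List.cons false)

-- the attempt-building loop; flips[i] is always in range (flips has length len(initial))
def solveAttempt (s : List Char) (flips : List Bool) : List Char :=
  (PySem.List.enumerate s 0).foldl
    (fun acc p =>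
      acc ++ [if p.2 = 'x' then (if PySem.List.pyGetD flips p.1 false then 'y' else 'x')
              else (if PySem.List.pyGetD flips p.1 false then 'x' else 'y')]) []

-- the validity loop with its for/else: true iff the loop did not break
def solveValid : List Char → Bool → Bool
  | [], _ => true
  | c :: rest, ys => if c = 'x' && ys then false else solveValid rest (ys || c = 'y')

def solveSum (flips : List Bool) : Int := flips.foldl (fun a b => a + (if b then 1 else 0)) 0

def solve (initial : String) : List Int :=
  let s := initial.toList
  let best : Int × List Bool :=
    (pyProduct s.length).foldl
      (fun best flips =>
        let attempt := solveAttempt s flips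
        if solveValid attempt false then
          let count := solveSum flips
          -- `best[0] is None` is never true (best[0] is always an int); the dead branch is omitted
          if count < best.1 then (count, flips) else best
        else best)
      ((s.length : Int), [])
  (PySem.List.enumerate best.2 0).filterMap (fun p => if p.2 then some p.1 else none)

-- ===== PORT B =====

def solve_alt (initial : String) : List Int :=
  let s := initial.toList
  let n := s.length
  let costsPair : List Int × Int :=
    (PySem.List.pyRange 0 ((n : Int) + 1) 1).foldl
      (fun p k =>
        (p.1 ++ [p.2],
         if k < (n : Int) then p.2 + (if PySem.List.pyGetD s k ' ' ≠ 'x' then 1 else -1) else p.2))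
      ([], s.foldl (fun a c => a + (if c = 'x' then 1 else 0)) 0)
  let costs := costsPair.1
  -- costs is nonempty (length n+1), so min(costs) never raises
  let m := (PySem.List.min? costs (fun x => x)).getD 0
  let cands := (PySem.List.enumerate costs 0).filterMap (fun p => if p.2 = m then some p.1 else none)
  -- cands is nonempty (the minimum is attained), so cands[-1] never raises
  let bestK := (cands.find? (fun k => decide (k < (n : Int)) && (PySem.List.pyGetD s k ' ' == 'x'))).getD
                 (PySem.List.pyGetD cands (-1) 0)
  (PySem.List.enumerate s 0).filterMap
    (fun p => if (decide (p.2 ≠ 'x') == decide (p.1 < bestK)) then some p.1 else none)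

-- ===== PRECONDITION & SPEC =====
def Spec_solve (initial : String) (out : List Int) : Prop := out = solve_alt initial
instance (initial : String) (out : List Int) : Decidable (Spec_solve initial out) := by unfold Spec_solve; infer_instance

-- ===== CLAIM (what is proved, stated in full; the proofs are below) =====
def Claim_equal_solve : Prop := ∀ (initial : String), Dom_solve initial → Spec_solve initial (solve initial)

-- ===== LEMMAS AND PROOFS =====

-- proof-side characterisations
def ach (c : Char) (b : Bool) : Char :=
  if c = 'x' then (if b then 'y' else 'x') else (if b then 'x' else 'y')

-- the flip vector that makes positions < k 'x' and positions ≥ k 'y'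
def flipsOf : List Char → Nat → List Bool
  | [], _ => []
  | c :: s, 0 => decide (c = 'x') :: flipsOf s 0
  | c :: s, k+1 => decide (c ≠ 'x') :: flipsOf s k

-- number of flips for boundary k
def costN : List Char → Nat → Nat
  | [], _ => 0
  | c :: s, 0 => (if c = 'x' then 1 else 0) + costN s 0
  | c :: s, k+1 => (if c ≠ 'x' then 1 else 0) + costN s k

-- the boundaries 0..n listed in the itertools.product order of their flip vectors
def boundaryOrder : List Char → List Nat
  | [] => [0]
  | c :: s => if c = 'x' then 0 :: (boundaryOrder s).map (· + 1)
              else (boundaryOrder s).map (· + 1) ++ [0]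

theorem mem_pyProduct_length : ∀ n (f : List Bool), f ∈ pyProduct n → f.length = n := by
  intro n
  induction n with
  | zero => intro f h; simp [pyProduct] at h; simp [h]
  | succ n ih =>
    intro f h
    simp only [pyProduct, List.mem_append, List.mem_map] at h
    rcases h with ⟨g, hg, rfl⟩ | ⟨g, hg, rfl⟩ <;> simp [ih g hg]

theorem getPre (pre : List Bool) (b : Bool) (f : List Bool) :
    PySem.List.pyGetD (pre ++ b :: f) ((pre.length : Int)) false = b := by
  rw [PySem.List.pyGetD_natCast]
  induction pre with
  | nil => rfl
  | cons a pre ih => simpa [List.getD_cons_succ] using ih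

theorem attempt_aux (s : List Char) : ∀ (f pre : List Bool) (acc : List Char),
    f.length = s.length →
    (PySem.List.enumerate s ((pre.length : Int))).foldl
      (fun acc p =>
        acc ++ [if p.2 = 'x' then (if PySem.List.pyGetD (pre ++ f) p.1 false then 'y' else 'x')
                else (if PySem.List.pyGetD (pre ++ f) p.1 false then 'x' else 'y')]) acc
      = acc ++ List.zipWith ach s f := by
  induction s with
  | nil => intro f pre acc h; simp [PySem.List.enumerate_nil]
  | cons c s ih =>
    intro f pre acc h
    cases f with
    | nil => simp at h
    | cons b f =>
      rw [PySem.List.enumerate_cons, List.foldl_cons]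
      have h2 : pre ++ b :: f = (pre ++ [b]) ++ f := by simp
      have hb : PySem.List.pyGetD (pre ++ b :: f) ((pre.length : Int)) false = b :=
        getPre pre b f
      have h1 : (pre.length : Int) + 1 = (((pre ++ [b]).length : Nat) : Int) := by simp
      simp only [hb]
      simp only [h2, h1]
      rw [ih f (pre ++ [b]) _ (by simpa using h)]
      simp [ach, List.zipWith_cons_cons]

theorem attempt_eq (s : List Char) (f : List Bool) (h : f.length = s.length) :
    solveAttempt s f = List.zipWith ach s f := by
  have := attempt_aux s f [] [] h
  simpa [solveAttempt] using this

theorem validTrue (l : List Char) : solveValid l true = l.all (fun a => !(a == 'x')) := by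
  induction l with
  | nil => rfl
  | cons c l ih => by_cases hc : c = 'x' <;> simp [solveValid, hc, ih]

theorem allY_filter (s : List Char) :
    (pyProduct s.length).filter (fun f => (List.zipWith ach s f).all (fun a => !(a == 'x')))
      = [flipsOf s 0] := by
  induction s with
  | nil => rfl
  | cons c s ih =>
    show (pyProduct (s.length + 1)).filter _ = _
    simp only [pyProduct, List.filter_append, List.filter_map]
    by_cases hc : c = 'x' <;>
      simp [Function.comp_def, ach, hc, flipsOf, ih]

theorem valid_filter (s : List Char) :
    (pyProduct s.length).filter (fun f => solveValid (List.zipWith ach s f) false)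
      = (boundaryOrder s).map (flipsOf s) := by
  induction s with
  | nil => rfl
  | cons c s ih =>
    show (pyProduct (s.length + 1)).filter _ = _
    simp only [pyProduct, List.filter_append, List.filter_map]
    by_cases hc : c = 'x' <;>
      simp [Function.comp_def, solveValid, ach, hc, validTrue, flipsOf, boundaryOrder,
            allY_filter, ih, List.map_map]

theorem mem_boundaryOrder (s : List Char) : ∀ (k : Nat),
    k ∈ boundaryOrder s ↔ k ≤ s.length := by
  induction s with
  | nil => intro k; simp [boundaryOrder]
  | cons c s ih =>
    intro k
    by_cases hc : c = 'x'
    · simp only [boundaryOrder, if_pos hc, List.mem_cons, List.mem_map]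
      constructor
      · rintro (rfl | ⟨j, hj, rfl⟩)
        · omega
        · have := (ih j).mp hj; simp; omega
      · intro hk
        cases k with
        | zero => exact Or.inl rfl
        | succ k => exact Or.inr ⟨k, (ih k).mpr (by simpa using hk), rfl⟩
    · simp only [boundaryOrder, if_neg hc, List.mem_append, List.mem_map, List.mem_singleton]
      constructor
      · rintro (⟨j, hj, rfl⟩ | rfl)
        · have := (ih j).mp hj; simp; omega
        · omega
      · intro hk
        cases k with
        | zero => exact Or.inr rfl
        | succ k => exact Or.inl ⟨k, (ih k).mpr (by simpa using hk), rfl⟩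

theorem solveSum_shift (l : List Bool) : ∀ (a : Int),
    l.foldl (fun a b => a + (if b then 1 else 0)) a = a + solveSum l := by
  induction l with
  | nil => intro a; simp [solveSum]
  | cons b l ih =>
    intro a
    rw [solveSum, List.foldl_cons, List.foldl_cons, ih, ih]
    ring

theorem solveSum_cons (b : Bool) (l : List Bool) :
    solveSum (b :: l) = (if b then 1 else 0) + solveSum l := by
  rw [solveSum, List.foldl_cons, solveSum_shift]
  ring

theorem count_flips (s : List Char) : ∀ k, solveSum (flipsOf s k) = (costN s k : Int) := by
  induction s with
  | nil => intro k; simp [flipsOf, costN, solveSum]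
  | cons c s ih =>
    intro k
    cases k <;> by_cases hc : c = 'x' <;>
      simp [flipsOf, costN, solveSum_cons, ih, hc] <;> push_cast <;> omega

theorem costsum (s : List Char) : costN s 0 + costN s s.length = s.length := by
  induction s with
  | nil => rfl
  | cons c s ih => by_cases hc : c = 'x' <;> simp [costN, hc] <;> omega

theorem cost_succ (s : List Char) : ∀ k, k < s.length →
    (costN s (k+1) : Int) = (costN s k : Int) + (if s.getD k ' ' ≠ 'x' then 1 else -1) := by
  induction s with
  | nil => intro k h; simp at h
  | cons c s ih =>
    intro k hk
    cases k with
    | zero =>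
      by_cases hc : c = 'x' <;> simp [costN, List.getD_cons_zero, hc] <;> push_cast <;> ring
    | succ k =>
      have hk' : k < s.length := by simpa using hk
      by_cases hc : c = 'x' <;>
        simp only [costN, List.getD_cons_succ, hc] <;> push_cast <;> rw [ih k hk'] <;>
        split_ifs <;> push_cast <;> ring

-- the argmin fold: no element below the threshold leaves best unchanged
theorem foldNoImprove (s : List Char) (L : List Nat) : ∀ (b : Int × List Bool),
    (∀ k ∈ L, ¬ ((costN s k : Int) < b.1)) →
    L.foldl (fun b k => if (costN s k : Int) < b.1 then ((costN s k : Int), flipsOf s k) else b) b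
      = b := by
  induction L with
  | nil => intro b _; rfl
  | cons k L ih =>
    intro b h
    simp only [List.foldl_cons]
    rw [if_neg (h k (by simp))]
    exact ih b (fun k' hk' => h k' (by simp [hk']))

-- the argmin fold returns the minimum with its FIRST witness
theorem foldFM (s : List Char) (m : Int) :
    ∀ (L : List Nat) (b : Int × List Bool),
    (∀ k ∈ L, m ≤ (costN s k : Int)) → (∃ k ∈ L, (costN s k : Int) = m) → m < b.1 →
    L.foldl (fun b k => if (costN s k : Int) < b.1 then ((costN s k : Int), flipsOf s k) else b) b
      = (m, flipsOf s ((L.find? (fun k => (costN s k : Int) == m)).getD 0)) := by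
  intro L
  induction L with
  | nil => intro b _ hex _; simp at hex
  | cons k L ih =>
    intro b hm hex hb
    simp only [List.foldl_cons]
    by_cases hk : (costN s k : Int) = m
    · rw [List.find?_cons_of_pos (by simp [hk]), if_pos (by rw [hk]; exact hb)]
      rw [hk]
      simp only [Option.getD_some]
      exact foldNoImprove s L (m, flipsOf s k)
        (fun k' hk' => not_lt.mpr (hm k' (by simp [hk'])))
    · rw [List.find?_cons_of_neg (by simp [hk])]
      have hgt : m < (costN s k : Int) := lt_of_le_of_ne (hm k (by simp)) (Ne.symm hk)
      have hex' : ∃ k' ∈ L, (costN s k' : Int) = m := by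
        obtain ⟨k', hk', hc⟩ := hex
        rcases List.mem_cons.mp hk' with rfl | h'
        · exact absurd hc hk
        · exact ⟨k', h', hc⟩
      by_cases hlt : (costN s k : Int) < b.1
      · rw [if_pos hlt]
        exact ih _ (fun k' hk' => hm k' (by simp [hk'])) hex' hgt
      · rw [if_neg hlt]
        exact ih _ (fun k' hk' => hm k' (by simp [hk'])) hex' hb

-- the boundaries of minimal cost, ascending
def candsOf (s : List Char) (m : Int) : List Nat :=
  (List.range (s.length + 1)).filter (fun j => (costN s j : Int) == m)

-- the first minimal boundary in product order = B's pick
def pickB (s : List Char) (m : Int) : Nat :=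
  ((candsOf s m).find? (fun j => decide (j < s.length) && (s.getD j ' ' == 'x'))).getD
    ((candsOf s m).getLast?.getD 0)

theorem find?_congr' {α : Type} (p q : α → Bool) : ∀ (l : List α), (∀ x ∈ l, p x = q x) →
    l.find? p = l.find? q := by
  intro l
  induction l with
  | nil => intro _; rfl
  | cons a l ih =>
    intro h
    rw [List.find?_cons, List.find?_cons, h a (by simp)]
    cases q a
    · exact ih (fun x hx => h x (by simp [hx]))
    · rfl

theorem find?_map' {α β : Type} (f : α → β) (p : β → Bool) : ∀ (l : List α),
    (l.map f).find? p = (l.find? (fun x => p (f x))).map f := by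
  intro l
  induction l with
  | nil => rfl
  | cons a l ih =>
    simp only [List.map_cons, List.find?_cons]
    cases hpa : p (f a) <;> simp [hpa, ih]

theorem getLast?_map' {α β : Type} (f : α → β) : ∀ (l : List α),
    (l.map f).getLast? = l.getLast?.map f := by
  intro l
  induction l with
  | nil => rfl
  | cons a l ih =>
    cases l with
    | nil => rfl
    | cons b l => simpa [List.getLast?_cons_cons] using ih

theorem find?_append' {α : Type} (p : α → Bool) (l₁ l₂ : List α) :
    (l₁ ++ l₂).find? p = ((l₁.find? p).or (l₂.find? p)) := by
  induction l₁ with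
  | nil => simp
  | cons a l ih =>
    rw [List.cons_append, List.find?_cons, List.find?_cons]
    cases hpa : p a <;> simp [hpa, ih]

theorem getLast?_cons_ne {α : Type} (a : α) (L : List α) (h : L ≠ []) :
    (a :: L).getLast? = L.getLast? := by
  cases L with
  | nil => exact absurd rfl h
  | cons b l => simp [List.getLast?_cons_cons]

theorem beq_shift1 (a : Nat) (m : Int) :
    (((1 + a : Nat) : Int) == m) = (((a : Nat) : Int) == m - 1) := by
  rw [show ((1 + a : Nat) : Int) = 1 + (a : Int) from by push_cast; ring]
  by_cases hm : ((a : Nat) : Int) = m - 1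
  · have h2 : 1 + (a : Int) = m := by omega
    simp [hm, h2]
  · have h2 : ¬ 1 + (a : Int) = m := by omega
    simp [hm, h2]

theorem mem_candsOf (s : List Char) (m : Int) (j : Nat) :
    j ∈ candsOf s m ↔ j ≤ s.length ∧ (costN s j : Int) = m := by
  simp [candsOf, List.mem_filter, List.mem_range, Nat.lt_succ_iff, beq_iff_eq]

theorem cands_cons (c : Char) (s : List Char) (m : Int) :
    candsOf (c :: s) m
      = (if (costN (c :: s) 0 : Int) = m then [0] else [])
        ++ (candsOf s (m - (if c = 'x' then 0 else 1))).map (· + 1) := by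
  have htail : (List.map Nat.succ (List.range (s.length + 1))).filter
        (fun j => ((costN (c :: s) j : Int) == m))
      = (candsOf s (m - (if c = 'x' then 0 else 1))).map (· + 1) := by
    rw [List.filter_map]
    have hpred : ∀ j ∈ List.range (s.length + 1),
        ((fun j => ((costN (c :: s) j : Int) == m)) ∘ Nat.succ) j
          = (fun j => ((costN s j : Int) == m - (if c = 'x' then 0 else 1))) j := by
      intro j _
      by_cases hcx : c = 'x'
      · simp [costN, hcx]
      · simp only [Function.comp_apply, Nat.succ_eq_add_one, if_neg hcx]
        have h1 : costN (c :: s) (j + 1) = 1 + costN s j := by simp [costN, hcx]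
        rw [h1, beq_shift1]
    rw [List.filter_congr hpred]
    simp [candsOf, Nat.succ_eq_add_one]
  simp only [candsOf, List.length_cons]
  rw [List.range_succ_eq_map]
  by_cases h0 : (costN (c :: s) 0 : Int) = m
  · rw [List.filter_cons_of_pos (by simp [beq_iff_eq, h0]), htail, if_pos h0]
    simp [candsOf]
  · rw [List.filter_cons_of_neg (by simp [beq_iff_eq, h0]), htail, if_neg h0]
    simp [candsOf]

theorem pickB_cons_x_hit (c : Char) (s : List Char) (m : Int) (hc : c = 'x')
    (h0 : (costN (c :: s) 0 : Int) = m) : pickB (c :: s) m = 0 := by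
  subst hc
  have hcand : candsOf ('x' :: s) m = 0 :: (candsOf s m).map (· + 1) := by
    rw [cands_cons]; simp [h0]
  simp only [pickB, hcand]
  rw [List.find?_cons_of_pos (by simp)]
  rfl

theorem pickB_cons_x_miss (c : Char) (s : List Char) (m : Int) (hc : c = 'x')
    (h0 : ¬ (costN (c :: s) 0 : Int) = m) (hne : candsOf s m ≠ []) :
    pickB (c :: s) m = pickB s m + 1 := by
  subst hc
  have hcand : candsOf ('x' :: s) m = (candsOf s m).map (· + 1) := by
    rw [cands_cons]; simp [h0]
  simp only [pickB, hcand]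
  rw [find?_map', getLast?_map']
  rw [find?_congr' _ (fun j => decide (j < s.length) && (List.getD s j ' ' == 'x'))
        (candsOf s m) (fun j _ => by simp [List.getD_cons_succ, Nat.succ_lt_succ_iff])]
  cases hfind : (candsOf s m).find? (fun j => decide (j < s.length) && (List.getD s j ' ' == 'x')) with
  | some v => simp [hfind]
  | none =>
    cases hlast : (candsOf s m).getLast? with
    | none => exact absurd (List.getLast?_eq_none_iff.mp hlast) hne
    | some v => simp [hfind, hlast]

theorem pickB_cons_nx_hit (c : Char) (s : List Char) (m : Int) (hc : ¬ c = 'x')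
    (hne : candsOf s (m - 1) ≠ []) :
    pickB (c :: s) m = pickB s (m - 1) + 1 := by
  have hcand : candsOf (c :: s) m
      = (if (costN (c :: s) 0 : Int) = m then [0] else []) ++ (candsOf s (m - 1)).map (· + 1) := by
    rw [cands_cons]; simp [hc]
  have hmapne : (candsOf s (m - 1)).map (· + 1) ≠ [] := by
    simpa using hne
  simp only [pickB, hcand]
  have hfind0 : ((if (costN (c :: s) 0 : Int) = m then [0] else [])
        ++ (candsOf s (m - 1)).map (· + 1)).find?
          (fun j => decide (j < (c :: s).length) && (List.getD (c :: s) j ' ' == 'x'))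
      = ((candsOf s (m - 1)).map (· + 1)).find?
          (fun j => decide (j < (c :: s).length) && (List.getD (c :: s) j ' ' == 'x')) := by
    split_ifs
    · show (0 :: (candsOf s (m - 1)).map (· + 1)).find? _ = _
      rw [List.find?_cons_of_neg (by simp [hc])]
    · simp
  have hlast0 : ((if (costN (c :: s) 0 : Int) = m then [0] else [])
        ++ (candsOf s (m - 1)).map (· + 1)).getLast?
      = ((candsOf s (m - 1)).map (· + 1)).getLast? := by
    split_ifs
    · show (0 :: (candsOf s (m - 1)).map (· + 1)).getLast? = _
      exact getLast?_cons_ne _ _ hmapne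
    · simp
  rw [hfind0, hlast0, find?_map', getLast?_map']
  rw [find?_congr' _ (fun j => decide (j < s.length) && (List.getD s j ' ' == 'x'))
        (candsOf s (m - 1)) (fun j _ => by simp [List.getD_cons_succ, Nat.succ_lt_succ_iff])]
  cases hfind : (candsOf s (m - 1)).find? (fun j => decide (j < s.length) && (List.getD s j ' ' == 'x')) with
  | some v => simp [hfind]
  | none =>
    cases hlast : (candsOf s (m - 1)).getLast? with
    | none => exact absurd (List.getLast?_eq_none_iff.mp hlast) hne
    | some v => simp [hfind, hlast]

theorem pickB_cons_nx_miss (c : Char) (s : List Char) (m : Int) (hc : ¬ c = 'x')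
    (h0 : (costN (c :: s) 0 : Int) = m) (hnone : candsOf s (m - 1) = []) :
    pickB (c :: s) m = 0 := by
  have hcand : candsOf (c :: s) m = [0] := by
    rw [cands_cons]; simp [hc, h0, hnone]
  simp only [pickB, hcand]
  rw [List.find?_cons_of_neg (by simp [hc])]
  rfl

theorem pick_eq : ∀ (s : List Char) (m : Int),
    (∃ k, k ≤ s.length ∧ (costN s k : Int) = m) →
    (boundaryOrder s).find? (fun k => (costN s k : Int) == m) = some (pickB s m) := by
  intro s
  induction s with
  | nil =>
    intro m hex
    obtain ⟨k, hk, hcst⟩ := hex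
    have hk0 : k = 0 := Nat.le_zero.mp hk
    subst hk0
    simp only [costN, Nat.cast_zero] at hcst
    subst hcst
    decide
  | cons c s ih =>
    intro m hex
    by_cases hc : c = 'x'
    · rw [show boundaryOrder (c :: s) = 0 :: (boundaryOrder s).map (· + 1) from by
        simp [boundaryOrder, hc]]
      by_cases h0 : (costN (c :: s) 0 : Int) = m
      · rw [List.find?_cons_of_pos (by simp [beq_iff_eq, h0]),
            pickB_cons_x_hit c s m hc h0]
      · rw [List.find?_cons_of_neg (by simp [beq_iff_eq, h0])]
        have hex' : ∃ k, k ≤ s.length ∧ (costN s k : Int) = m := by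
          obtain ⟨k, hk, hcst⟩ := hex
          cases k with
          | zero => exact absurd hcst h0
          | succ k => exact ⟨k, by simpa using hk, by simpa [costN, hc] using hcst⟩
        rw [find?_map']
        rw [find?_congr' _ (fun j => (costN s j : Int) == m) (boundaryOrder s)
              (fun j _ => by simp [costN, hc])]
        rw [ih m hex']
        have hne : candsOf s m ≠ [] := by
          obtain ⟨k, hk, hcst⟩ := hex'
          exact List.ne_nil_of_mem ((mem_candsOf s m k).mpr ⟨hk, hcst⟩)
        rw [pickB_cons_x_miss c s m hc h0 hne]
        rfl
    · rw [show boundaryOrder (c :: s) = (boundaryOrder s).map (· + 1) ++ [0] from by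
        simp [boundaryOrder, hc]]
      rw [find?_append', find?_map']
      rw [find?_congr' _ (fun j => (costN s j : Int) == m - 1) (boundaryOrder s)
            (fun j _ => by
              have h1 : costN (c :: s) (j + 1) = 1 + costN s j := by simp [costN, hc]
              show ((costN (c :: s) (j + 1) : Int) == m) = _
              rw [h1, beq_shift1])]
      by_cases hex' : ∃ k, k ≤ s.length ∧ (costN s k : Int) = m - 1
      · rw [ih (m - 1) hex']
        have hne : candsOf s (m - 1) ≠ [] := by
          obtain ⟨k, hk, hcst⟩ := hex'
          exact List.ne_nil_of_mem ((mem_candsOf s (m - 1) k).mpr ⟨hk, hcst⟩)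
        rw [pickB_cons_nx_hit c s m hc hne]
        rfl
      · have hnone : (boundaryOrder s).find? (fun j => (costN s j : Int) == m - 1) = none := by
          rw [List.find?_eq_none]
          intro j hj
          simp only [beq_iff_eq]
          intro hq
          exact hex' ⟨j, (mem_boundaryOrder s j).mp hj, by simpa using hq⟩
        rw [hnone]
        have h0 : (costN (c :: s) 0 : Int) = m := by
          obtain ⟨k, hk, hcst⟩ := hex
          cases k with
          | zero => exact hcst
          | succ k =>
            exfalso
            apply hex'
            refine ⟨k, by simpa using hk, ?_⟩
            have h1 : costN (c :: s) (k + 1) = 1 + costN s k := by simp [costN, hc]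
            rw [h1] at hcst
            push_cast at hcst ⊢
            omega
        have hnone2 : candsOf s (m - 1) = [] := by
          rcases h : candsOf s (m - 1) with _ | ⟨j, l⟩
          · rfl
          · exfalso
            apply hex'
            have hjmem : j ∈ candsOf s (m - 1) := by rw [h]; simp
            obtain ⟨hj1, hj2⟩ := (mem_candsOf _ _ _).mp hjmem
            exact ⟨j, hj1, hj2⟩
        rw [pickB_cons_nx_miss c s m hc h0 hnone2]
        simp [List.find?_cons, beq_iff_eq, h0]

theorem out_low (s : List Char) (t b b' : Int) (hb : b ≤ t) (hb' : b' ≤ t) :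
    (PySem.List.enumerate s t).filterMap
        (fun p => if (decide (p.2 ≠ 'x') == decide (p.1 < b)) then some p.1 else none)
      = (PySem.List.enumerate s t).filterMap
        (fun p => if (decide (p.2 ≠ 'x') == decide (p.1 < b')) then some p.1 else none) := by
  apply List.filterMap_congr
  intro p hp
  obtain ⟨k, hk, rfl⟩ := (PySem.List.mem_enumerate_iff _ _ _).mp hp
  have e1 : ¬ (t + (k : Int) < b) := by omega
  have e2 : ¬ (t + (k : Int) < b') := by omega
  simp [e1, e2]

theorem out_eq (s : List Char) : ∀ (k : Nat) (t : Int),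
    (PySem.List.enumerate (flipsOf s k) t).filterMap (fun p => if p.2 then some p.1 else none)
      = (PySem.List.enumerate s t).filterMap
          (fun p => if (decide (p.2 ≠ 'x') == decide (p.1 < t + (k : Int))) then some p.1 else none) := by
  induction s with
  | nil => intro k t; simp [flipsOf, PySem.List.enumerate_nil]
  | cons c s ihs =>
    intro k t
    cases k with
    | zero =>
      rw [show flipsOf (c :: s) 0 = decide (c = 'x') :: flipsOf s 0 from rfl,
          PySem.List.enumerate_cons, PySem.List.enumerate_cons]
      simp only [List.filterMap_cons]
      rw [ihs 0 (t + 1)]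
      rw [out_low s (t + 1) ((t + 1) + ((0 : Nat) : Int)) (t + ((0 : Nat) : Int))
            (by simp) (by simp)]
      have hh : (decide (c ≠ 'x') == decide (t < t + ((0 : Nat) : Int))) = decide (c = 'x') := by
        simp
      rw [hh]
    | succ k =>
      rw [show flipsOf (c :: s) (k + 1) = decide (c ≠ 'x') :: flipsOf s k from rfl,
          PySem.List.enumerate_cons, PySem.List.enumerate_cons]
      simp only [List.filterMap_cons]
      rw [ihs k (t + 1)]
      have hb : t + ((k + 1 : Nat) : Int) = (t + 1) + (k : Int) := by push_cast; ring
      have hh : (decide (c ≠ 'x') == decide (t < t + ((k + 1 : Nat) : Int))) = decide (c ≠ 'x') := by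
        have : t < t + ((k + 1 : Nat) : Int) := by push_cast; omega
        simp [this]
      rw [hh, hb]

theorem xcount_shift (s : List Char) : ∀ (a : Int),
    s.foldl (fun a c => a + (if c = 'x' then 1 else 0)) a = a + (costN s 0 : Int) := by
  induction s with
  | nil => intro a; simp [costN]
  | cons c s ih =>
    intro a
    rw [List.foldl_cons, ih]
    by_cases hc : c = 'x' <;> simp [costN, hc] <;> push_cast <;> ring

theorem costs_inv (s : List Char) : ∀ (N : Nat), N ≤ s.length + 1 →
    (List.range N).foldl
      (fun (p : List Int × Int) (j : Nat) =>
        (p.1 ++ [p.2],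
         if ((j : Nat) : Int) < (s.length : Int)
         then p.2 + (if PySem.List.pyGetD s ((j : Nat) : Int) ' ' ≠ 'x' then 1 else -1)
         else p.2))
      ([], (costN s 0 : Int))
      = ((List.range N).map (fun j => (costN s j : Int)), (costN s (min N s.length) : Int)) := by
  intro N
  induction N with
  | zero => intro _; simp
  | succ N ihN =>
    intro hN
    rw [List.range_succ, List.foldl_append, ihN (by omega), List.foldl_cons, List.foldl_nil]
    have hminN : min N s.length = N := by omega
    rw [hminN]
    simp only [Prod.mk.injEq]
    constructor
    · simp [List.range_succ]
    · by_cases hlt : N < s.length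
      · have hc : (((N : Nat) : Int) < (s.length : Int)) := by exact_mod_cast hlt
        have hmin2 : min (N + 1) s.length = N + 1 := by omega
        rw [if_pos hc, hmin2, PySem.List.pyGetD_natCast]
        exact (cost_succ s N hlt).symm
      · have hc : ¬ (((N : Nat) : Int) < (s.length : Int)) := by omega
        have hmin2 : min (N + 1) s.length = s.length := by omega
        have hNlen : N = s.length := by omega
        rw [if_neg hc, hmin2, hNlen]

theorem enum_map_range {α : Type} (g : Nat → α) : ∀ (N : Nat) (t : Int),
    PySem.List.enumerate ((List.range N).map g) t
      = (List.range N).map (fun (j : Nat) => (t + (j : Int), g j)) := by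
  intro N
  induction N with
  | zero => intro t; simp [PySem.List.enumerate_nil]
  | succ N ih =>
    intro t
    rw [List.range_succ, List.map_append, PySem.List.enumerate_append, ih]
    simp [List.range_succ, PySem.List.enumerate_cons, PySem.List.enumerate_nil]

theorem filterMap_map' {α β γ : Type} (h : α → β) (f : β → Option γ) : ∀ (l : List α),
    (l.map h).filterMap f = l.filterMap (fun x => f (h x)) := by
  intro l
  induction l with
  | nil => rfl
  | cons a l ih =>
    simp only [List.map_cons, List.filterMap_cons]
    cases f (h a) <;> simp [ih]

theorem filterMap_if_map {α β : Type} (p : α → Bool) (f : α → β) : ∀ (l : List α),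
    l.filterMap (fun x => if p x then some (f x) else none) = (l.filter p).map f := by
  intro l
  induction l with
  | nil => rfl
  | cons a l ih =>
    simp only [List.filterMap_cons, List.filter_cons]
    cases hpa : p a <;> simp [hpa, ih]

theorem bestK_cast (s : List Char) (m : Int) (hne : candsOf s m ≠ []) :
    ((((candsOf s m).map (fun (j : Nat) => (j : Int))).find?
        (fun k => decide (k < (s.length : Int)) && (PySem.List.pyGetD s k ' ' == 'x'))).getD
      (PySem.List.pyGetD ((candsOf s m).map (fun (j : Nat) => (j : Int))) (-1) 0))
    = (pickB s m : Int) := by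
  have hmapne : (candsOf s m).map (fun (j : Nat) => (j : Int)) ≠ [] :=
    fun h => hne (List.map_eq_nil_iff.mp h)
  rw [find?_map']
  rw [find?_congr' _ (fun j => decide (j < s.length) && (List.getD s j ' ' == 'x')) (candsOf s m)
        (fun j _ => by simp)]
  cases hf : (candsOf s m).find? (fun j => decide (j < s.length) && (List.getD s j ' ' == 'x')) with
  | some v =>
    have hp : pickB s m = v := by unfold pickB; rw [hf]; rfl
    rw [hp]
    simp
  | none =>
    cases hl : (candsOf s m).getLast? with
    | none => exact absurd (List.getLast?_eq_none_iff.mp hl) hne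
    | some w =>
      have hlast : ((candsOf s m).map (fun (j : Nat) => (j : Int))).getLast? = some ((w : Int)) := by
        rw [getLast?_map', hl]; rfl
      have hgl : PySem.List.pyGetD ((candsOf s m).map (fun (j : Nat) => (j : Int))) (-1) 0 = (w : Int) := by
        rw [PySem.List.pyGetD_neg_one _ _ hmapne]
        have h := List.getLast?_eq_some_getLast hmapne
        rw [hlast] at h
        exact (Option.some_inj.mp h).symm
      have hp : pickB s m = w := by unfold pickB; rw [hf, hl]; rfl
      rw [hgl, hp]
      simp

-- ===== VERDICT (by name: the statement is the Claim_ definition above) =====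
theorem solve_spec : Claim_equal_solve := by
  unfold Claim_equal_solve
  intro initial _
  unfold Spec_solve
  show solve initial = solve_alt initial
  unfold solve solve_alt
  simp only []
  generalize initial.toList = s
  cases s with
  | nil => decide
  | cons c₀ s₀ =>
    generalize hgen : c₀ :: s₀ = s
    have hs : s ≠ [] := by rw [← hgen]; simp
    have hn1 : 1 ≤ s.length := by
      cases s with
      | nil => exact absurd rfl hs
      | cons a l => simp
    clear hgen
    -- B side: the costs list
    have hx0 : s.foldl (fun a c => a + (if c = 'x' then 1 else 0)) 0 = (costN s 0 : Int) := by
      simpa using xcount_shift s 0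
    rw [hx0]
    have hcosts : ((PySem.List.pyRange 0 ((s.length : Int) + 1) 1).foldl
        (fun (p : List Int × Int) k =>
          (p.1 ++ [p.2],
           if k < (s.length : Int) then p.2 + (if PySem.List.pyGetD s k ' ' ≠ 'x' then 1 else -1)
           else p.2))
        ([], (costN s 0 : Int))).1
        = (List.range (s.length + 1)).map (fun j => (costN s j : Int)) := by
      rw [PySem.List.pyRange_one]
      rw [show (((s.length : Int) + 1 - 0)).toNat = s.length + 1 from by omega]
      rw [List.foldl_map]
      simp only [zero_add]
      rw [costs_inv s (s.length + 1) (le_refl _)]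
    rw [hcosts]
    -- the minimum of the costs list
    cases hmin : PySem.List.min? ((List.range (s.length + 1)).map (fun j => (costN s j : Int)))
        (fun x => x) with
    | none =>
      rw [PySem.List.min?_eq_none_iff] at hmin
      exact absurd hmin (by simp)
    | some m =>
      rw [Option.getD_some]
      have hm_mem : m ∈ (List.range (s.length + 1)).map (fun j => (costN s j : Int)) :=
        PySem.List.min?_mem hmin
      have hm_min : ∀ y ∈ (List.range (s.length + 1)).map (fun j => (costN s j : Int)), m ≤ y :=
        PySem.List.min?_isMin hmin
      obtain ⟨k₀, hk₀r, hk₀⟩ := List.mem_map.mp hm_mem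
      have hk₀n : k₀ ≤ s.length := by simpa [Nat.lt_succ_iff] using List.mem_range.mp hk₀r
      have hle : ∀ k, k ≤ s.length → m ≤ (costN s k : Int) := by
        intro k hk
        exact hm_min _ (List.mem_map.mpr ⟨k, List.mem_range.mpr (by omega), rfl⟩)
      have hex : ∃ k, k ≤ s.length ∧ (costN s k : Int) = m := ⟨k₀, hk₀n, hk₀⟩
      have hmlt : m < ((s.length : Nat) : Int) := by
        have h1 := hle 0 (by omega)
        have h2 := hle s.length (le_refl _)
        have h3 := costsum s
        omega
      have hnecands : candsOf s m ≠ [] :=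
        List.ne_nil_of_mem ((mem_candsOf s m k₀).mpr ⟨hk₀n, hk₀⟩)
      -- the candidate list of B = candsOf, cast to Int
      have hcands : (PySem.List.enumerate
            ((List.range (s.length + 1)).map (fun j => (costN s j : Int))) 0).filterMap
            (fun p => if p.2 = m then some p.1 else none)
          = (candsOf s m).map (fun (j : Nat) => (j : Int)) := by
        rw [enum_map_range, filterMap_map']
        have hstep : ∀ j ∈ List.range (s.length + 1),
            (fun (j : Nat) => if ((0 : Int) + (j : Int), (costN s j : Int)).2 = m
                      then some ((0 : Int) + (j : Int), (costN s j : Int)).1 else none) j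
            = (fun (j : Nat) => if ((costN s j : Int) == m) then some ((j : Int)) else none) j := by
          intro j _
          by_cases hj : (costN s j : Int) = m <;> simp [hj, zero_add]
        rw [List.filterMap_congr hstep, filterMap_if_map]
        rfl
      rw [hcands, bestK_cast s m hnecands]
      -- A side: reduce the 2^n fold to the boundary fold
      have hstepA : (pyProduct s.length).foldl
          (fun (best : Int × List Bool) flips =>
            if solveValid (solveAttempt s flips) false then
              (if solveSum flips < best.1 then (solveSum flips, flips) else best)
            else best)
          (((s.length : Nat) : Int), [])
          = (m, flipsOf s (pickB s m)) := by
        rw [PySem.List.foldl_congr_mem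
              (g := fun (best : Int × List Bool) flips =>
                if solveValid (List.zipWith ach s flips) false then
                  (if solveSum flips < best.1 then (solveSum flips, flips) else best)
                else best)
              (h := by
                intro acc f hf
                simp only []
                rw [attempt_eq s f (mem_pyProduct_length s.length f hf)])]
        rw [PySem.List.foldl_if_eq_foldl_filter]
        rw [valid_filter, List.foldl_map]
        simp only [count_flips]
        rw [foldFM s m (boundaryOrder s) _
              (fun k hk => hle k ((mem_boundaryOrder s k).mp hk))
              ⟨k₀, (mem_boundaryOrder s k₀).mpr hk₀n, hk₀⟩ hmlt]
        rw [pick_eq s m hex]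
        rfl
      rw [hstepA,
          show ((m, flipsOf s (pickB s m)) : Int × List Bool).2 = flipsOf s (pickB s m) from rfl]
      -- both outputs coincide
      have hout := out_eq s (pickB s m) 0
      simp only [zero_add] at hout
      exact hout
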